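-- pv_equiv track=rewrite | github.com/pmgdeb/certbot | certbot-nginx/certbot_nginx/tests/util.py | contains_at_depth
-- ===== SOURCE A (Python) =====
-- def contains_at_depth(haystack, needle, n):
--     """Is the needle in haystack at depth n?
--
--     Return true if the needle is present in one of the sub-iterables in haystack
--     at depth n. Haystack must be an iterable.
--     """
--     # Specifically use hasattr rather than isinstance(..., collections.Iterable)
--     # because we want to include lists but reject strings.
--     if not hasattr(haystack, '__iter__') or hasattr(haystack, 'strip'):
--         return False
--     if n == 0:
--         return needle in haystack
--     for item in haystack:
--         if contains_at_depth(item, needle, n - 1):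
--             return True
--     return False
-- ===== SOURCE B (Python) =====
-- def contains_at_depth(haystack, needle, n):
--     """Is the needle in haystack at depth n?
--
--     Iterative depth-first search with an explicit stack of (node, depth)
--     pairs instead of recursion.  A node counts as iterable when it has
--     '__iter__' but no 'strip' (so lists count, strings do not).
--     """
--     stack = [(haystack, n)]
--     while stack:
--         node, depth = stack.pop()
--         if not hasattr(node, '__iter__') or hasattr(node, 'strip'):
--             continue
--         if depth == 0:
--             if needle in node:
--                 return True
--         else:
--             stack.extend((child, depth - 1) for child in reversed(node))
--     return False
-- ===== Notes on version B (the rewrite author's own statement) =====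
-- stated objective: alternative
-- what changed: Replaces A's recursion with an iterative depth-first traversal over an explicit stack of (node, depth) pairs, popping nodes and pushing children with decremented depth until a depth-0 iterable contains the needle.
import Mathlib
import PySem

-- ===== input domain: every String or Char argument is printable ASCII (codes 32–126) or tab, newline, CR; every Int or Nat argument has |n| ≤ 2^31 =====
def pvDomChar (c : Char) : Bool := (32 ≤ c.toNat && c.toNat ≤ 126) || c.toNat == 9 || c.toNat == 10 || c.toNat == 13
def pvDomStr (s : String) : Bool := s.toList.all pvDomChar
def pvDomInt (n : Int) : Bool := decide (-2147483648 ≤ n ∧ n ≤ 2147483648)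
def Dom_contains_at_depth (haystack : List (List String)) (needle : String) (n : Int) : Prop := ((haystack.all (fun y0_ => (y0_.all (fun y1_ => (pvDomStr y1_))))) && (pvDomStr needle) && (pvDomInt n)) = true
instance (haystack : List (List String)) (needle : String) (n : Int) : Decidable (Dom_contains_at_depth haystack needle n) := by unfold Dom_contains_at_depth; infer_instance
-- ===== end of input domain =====

-- B replaces A's recursion by an iterative DFS over an explicit stack of
-- (node, depth) pairs (objective: alternative; same cost).

-- ===== PORT A =====
-- A's recursion, transcribed along the fixed type structure List (List String):
-- the top level is a list (has __iter__, no strip), its items are lists, and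
-- their items are strings (a string has 'strip', so A's first guard fires).

-- A called on a string node: `hasattr(haystack, 'strip')` holds, so False.
def cadAStr (_s : String) (_needle : String) (_n : Int) : Bool := false

-- Python `needle in haystack` at the top level compares a str with each inner
-- list; `str == list` is False in Python, so each comparison is False (exact).
def cadAEqStrList (_needle : String) (_item : List String) : Bool := false

-- A called on an inner list node (has __iter__, no strip).
def cadAInner (item : List String) (needle : String) (n : Int) : Bool :=
  if n = 0 then item.contains needle
  else item.any (fun s => cadAStr s needle (n - 1))

def contains_at_depth (haystack : List (List String)) (needle : String) (n : Int) : Bool :=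
  if n = 0 then haystack.any (fun item => cadAEqStrList needle item)
  else haystack.any (fun item => cadAInner item needle (n - 1))

-- ===== PORT B =====
-- A stack entry's node is the whole haystack, an inner list, or a string.
inductive CadNode : Type
  | top  : List (List String) → CadNode
  | mid  : List String → CadNode
  | leaf : String → CadNode
deriving DecidableEq, Repr

def cadSize : CadNode → Nat
  | .leaf _ => 1
  | .mid l => 1 + l.length
  | .top h => 1 + (h.map (fun l => 1 + l.length)).sum

def cadStackSize (s : List (CadNode × Int)) : Nat := (s.map (fun p => cadSize p.1)).sum

-- Python `needle in node` when node is the top-level list of lists: every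
-- `str == list` comparison is False (exact).
def cadBEqStrList (_needle : String) (_item : List String) : Bool := false

-- Source B's while loop.  `stack.extend(... for child in reversed(node))` followed
-- by `stack.pop()` yields the children left to right, i.e. children-in-order
-- at the head of the list here (head = top of stack).
def cadLoop (needle : String) : List (CadNode × Int) → Bool
  | [] => false
  | (node, depth) :: rest =>
    match node with
    | .leaf _ => cadLoop needle rest        -- strings have 'strip': continue
    | .mid l =>
      if depth = 0 then
        if l.contains needle then true else cadLoop needle rest
      else cadLoop needle ((l.map fun s => (CadNode.leaf s, depth - 1)) ++ rest)
    | .top h =>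
      if depth = 0 then
        if h.any (fun item => cadBEqStrList needle item) then true
        else cadLoop needle rest
      else cadLoop needle ((h.map fun l => (CadNode.mid l, depth - 1)) ++ rest)
termination_by s => cadStackSize s
decreasing_by
  all_goals simp [cadStackSize, cadSize, Function.comp_def]

def contains_at_depth_alt (haystack : List (List String)) (needle : String) (n : Int) : Bool :=
  cadLoop needle [(CadNode.top haystack, n)]

-- ===== PRECONDITION & SPEC =====
def Spec_contains_at_depth (haystack : List (List String)) (needle : String) (n : Int) (out : Bool) : Prop := out = contains_at_depth_alt haystack needle n
instance (haystack : List (List String)) (needle : String) (n : Int) (out : Bool) : Decidable (Spec_contains_at_depth haystack needle n out) := by unfold Spec_contains_at_depth; infer_instance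

-- ===== CLAIM (what is proved, stated in full; the proofs are below) =====
def Claim_equal_contains_at_depth : Prop := ∀ (haystack : List (List String)) (needle : String) (n : Int), Dom_contains_at_depth haystack needle n → Spec_contains_at_depth haystack needle n (contains_at_depth haystack needle n)

-- ===== LEMMAS AND PROOFS =====

-- Leaf entries are skipped by the loop.
theorem cadLoop_leaves (needle : String) (d : Int) (ss : List String)
    (rest : List (CadNode × Int)) :
    cadLoop needle ((ss.map fun s => (CadNode.leaf s, d)) ++ rest) = cadLoop needle rest := by
  induction ss with
  | nil => rfl
  | cons s ss ih => simpa [cadLoop] using ih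

-- A block of mid entries at depth d answers "some inner list contains the
-- needle and d = 0", then falls through to the rest of the stack.
theorem cadLoop_mids (needle : String) (d : Int) (h : List (List String))
    (rest : List (CadNode × Int)) :
    cadLoop needle ((h.map fun l => (CadNode.mid l, d)) ++ rest) =
      (h.any (fun l => decide (d = 0) && l.contains needle) || cadLoop needle rest) := by
  induction h with
  | nil => simp
  | cons l h ih =>
    by_cases hd : d = 0
    · subst hd
      simp [cadLoop, ih, Bool.or_assoc]
    · simp [cadLoop, hd, cadLoop_leaves, ih]

-- ===== VERDICT (by name: the statement is the Claim_ definition above) =====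
theorem contains_at_depth_spec : Claim_equal_contains_at_depth := by
  intro haystack needle n _
  unfold Spec_contains_at_depth contains_at_depth contains_at_depth_alt
  by_cases h0 : n = 0
  · simp [h0, cadLoop, cadAEqStrList, cadBEqStrList]
  · have : cadLoop needle [(CadNode.top haystack, n)] =
        cadLoop needle ((haystack.map fun l => (CadNode.mid l, n - 1)) ++ []) := by
      simp [cadLoop, h0]
    rw [this, cadLoop_mids]
    simp [h0, cadAInner, cadAStr, cadLoop]
    exact List.any_congr rfl fun l => by by_cases h1 : n - 1 = 0 <;> simp [h1]
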